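-- pv_equiv track=rewrite | github.com/Javantea/explain-eval | explain1.py | is_L_dependent
-- ===== SOURCE A (Python) =====
-- WELL_COLUMN = 9
--
-- def is_L_dependent(surface):
--     """
--     Checks for L dependency using the 537 tool. A surface is L dependent when:
--     there is a drop of 2
--     and
--     then an increase of 3 or more.
--     """
--     L_dependent = []
--     for col in range(9):
--         if col == WELL_COLUMN: continue
--         diff = surface[col] - surface[col+1]
--         if diff == 2: L_dependent.append(col)
--     for col in L_dependent:
--         next_col = col + 1
--         if next_col >= 9: continue
--         diff_next = surface[next_col] - surface[next_col+1]
--         if diff_next < -2: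
--             return True
--     return False
-- ===== SOURCE B (Python) =====
-- def is_L_dependent(surface):
--     def scan(w):
--         if len(w) < 3:
--             return False
--         a, b, c = w[0], w[1], w[2]
--         return (a - b == 2 and b - c < -2) or scan(w[1:])
--     return scan([surface[c] for c in range(10)])
-- ===== Notes on version B (the rewrite author's own statement) =====
-- stated objective: alternative
-- what changed: Replaces A's index-based two-phase structure (collect the columns whose difference equals 2 into a list, then rescan each candidate's next difference) with a single recursive sliding-window pass over the values of the 10 columns, pattern-matching each consecutive triple directly with no difference recomputation and no intermediate candidate list.
import Mathlib
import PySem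

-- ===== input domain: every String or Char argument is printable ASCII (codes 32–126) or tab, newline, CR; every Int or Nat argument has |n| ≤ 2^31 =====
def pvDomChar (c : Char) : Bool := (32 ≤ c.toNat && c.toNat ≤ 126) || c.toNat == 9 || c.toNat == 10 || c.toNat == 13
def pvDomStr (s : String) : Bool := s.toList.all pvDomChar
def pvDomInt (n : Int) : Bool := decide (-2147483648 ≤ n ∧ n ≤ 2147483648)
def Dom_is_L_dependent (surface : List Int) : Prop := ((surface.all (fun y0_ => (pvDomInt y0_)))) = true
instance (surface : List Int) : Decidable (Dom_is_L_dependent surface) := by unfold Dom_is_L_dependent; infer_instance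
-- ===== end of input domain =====

-- B replaces A's index-based two-phase structure (collect diff==2 columns, rescan
-- candidates) with one recursive sliding-window pass over the values of the first
-- 10 columns, matching each consecutive triple directly (objective: alternative).
-- Equivalence on the return value, on lists of length ≥ 10 (both raise IndexError otherwise).

-- ===== PORT A =====
def is_L_dependent (surface : List Int) : Bool :=
  let L_dependent : List Int :=
    (PySem.List.pyRange 0 9 1).foldl (fun acc col =>
      if col = 9 then acc
      else
        let diff := (PySem.List.pyGet? surface col).getD 0
                  - (PySem.List.pyGet? surface (col + 1)).getD 0
        if diff = 2 then acc ++ [col] else acc) []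
  L_dependent.any (fun col =>
    let next_col := col + 1
    if next_col ≥ 9 then false
    else
      let diff_next := (PySem.List.pyGet? surface next_col).getD 0
                     - (PySem.List.pyGet? surface (next_col + 1)).getD 0
      decide (diff_next < -2))

-- ===== PORT B =====
-- Source B's inner recursive 'scan': a triple at the head, or recurse on the tail.
def pvScan : List Int → Bool
  | a :: b :: c :: w => (decide (a - b = 2) && decide (b - c < -2)) || pvScan (b :: c :: w)
  | _ => false

def is_L_dependent_alt (surface : List Int) : Bool :=
  pvScan ((PySem.List.pyRange 0 10 1).map (fun c => (PySem.List.pyGet? surface c).getD 0))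

-- ===== PRECONDITION & SPEC =====
-- A reads all ten columns (indices zero through nine) unconditionally, so it raises
-- IndexError on any list shorter than 10; exactly those inputs are excluded (B raises there too).
def Pre_is_L_dependent (surface : List Int) : Prop := 10 ≤ surface.length
instance (surface : List Int) : Decidable (Pre_is_L_dependent surface) := by unfold Pre_is_L_dependent; infer_instance
def pvWitness_is_L_dependent : List Int := [5, 3, 6, 2, 0, 0, 0, 0, 0, 0]
def Spec_is_L_dependent (surface : List Int) (out : Bool) : Prop := out = is_L_dependent_alt surface
instance (surface : List Int) (out : Bool) : Decidable (Spec_is_L_dependent surface out) := by unfold Spec_is_L_dependent; infer_instance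

-- ===== CLAIM (what is proved, stated in full; the proofs are below) =====
def Claim_equal_is_L_dependent : Prop := ∀ (surface : List Int), Dom_is_L_dependent surface → Pre_is_L_dependent surface → Spec_is_L_dependent surface (is_L_dependent surface)

-- ===== LEMMAS AND PROOFS =====

-- A's first loop: the foldl collecting matching columns is a filter.
theorem pvCollect_eq (surface : List Int) (l acc : List Int) :
    List.foldl (fun acc col =>
      if col = 9 then acc
      else
        let diff := (PySem.List.pyGet? surface col).getD 0
                  - (PySem.List.pyGet? surface (col + 1)).getD 0
        if diff = 2 then acc ++ [col] else acc) acc l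
    = acc ++ l.filter (fun col => decide (¬ col = 9)
        && decide ((PySem.List.pyGet? surface col).getD 0
                  - (PySem.List.pyGet? surface (col + 1)).getD 0 = 2)) := by
  induction l generalizing acc with
  | nil => simp
  | cons x xs ih =>
    simp only [List.foldl_cons, List.filter_cons]
    split_ifs <;> simp_all

-- any over a filter folds the filter predicate into the any predicate.
theorem pvAny_filter (p q : Int → Bool) (l : List Int) :
    (l.filter p).any q = l.any (fun x => p x && q x) := by
  induction l with
  | nil => rfl
  | cons x xs ih =>
    simp only [List.filter_cons]
    split_ifs with h <;> simp [List.any_cons, ih, h]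

-- ===== VERDICT (by name: the statement is the Claim_ definition above) =====
theorem is_L_dependent_spec : Claim_equal_is_L_dependent := by
  intro surface _ pre
  unfold Pre_is_L_dependent at pre
  rcases surface with _|⟨a0,_|⟨a1,_|⟨a2,_|⟨a3,_|⟨a4,_|⟨a5,_|⟨a6,_|⟨a7,_|⟨a8,_|⟨a9,rest⟩⟩⟩⟩⟩⟩⟩⟩⟩⟩ <;>
    simp only [List.length] at pre <;> try omega
  unfold Spec_is_L_dependent is_L_dependent is_L_dependent_alt
  have e0 : PySem.List.pyGet? (a0 :: a1 :: a2 :: a3 :: a4 :: a5 :: a6 :: a7 :: a8 :: a9 :: rest) 0 = some a0 := by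
    simp [PySem.List.pyGet?, PySem.List.pyIdx?]
    rw [if_pos (by omega)]
    simp
  have e1 : PySem.List.pyGet? (a0 :: a1 :: a2 :: a3 :: a4 :: a5 :: a6 :: a7 :: a8 :: a9 :: rest) 1 = some a1 := by
    simp [PySem.List.pyGet?, PySem.List.pyIdx?]
    rw [if_pos (by omega)]
    simp
  have e2 : PySem.List.pyGet? (a0 :: a1 :: a2 :: a3 :: a4 :: a5 :: a6 :: a7 :: a8 :: a9 :: rest) 2 = some a2 := by
    simp [PySem.List.pyGet?, PySem.List.pyIdx?]
    rw [if_pos (by omega)]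
    simp
  have e3 : PySem.List.pyGet? (a0 :: a1 :: a2 :: a3 :: a4 :: a5 :: a6 :: a7 :: a8 :: a9 :: rest) 3 = some a3 := by
    simp [PySem.List.pyGet?, PySem.List.pyIdx?]
    rw [if_pos (by omega)]
    simp
  have e4 : PySem.List.pyGet? (a0 :: a1 :: a2 :: a3 :: a4 :: a5 :: a6 :: a7 :: a8 :: a9 :: rest) 4 = some a4 := by
    simp [PySem.List.pyGet?, PySem.List.pyIdx?]
    rw [if_pos (by omega)]
    simp
  have e5 : PySem.List.pyGet? (a0 :: a1 :: a2 :: a3 :: a4 :: a5 :: a6 :: a7 :: a8 :: a9 :: rest) 5 = some a5 := by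
    simp [PySem.List.pyGet?, PySem.List.pyIdx?]
    rw [if_pos (by omega)]
    simp
  have e6 : PySem.List.pyGet? (a0 :: a1 :: a2 :: a3 :: a4 :: a5 :: a6 :: a7 :: a8 :: a9 :: rest) 6 = some a6 := by
    simp [PySem.List.pyGet?, PySem.List.pyIdx?]
    rw [if_pos (by omega)]
    simp
  have e7 : PySem.List.pyGet? (a0 :: a1 :: a2 :: a3 :: a4 :: a5 :: a6 :: a7 :: a8 :: a9 :: rest) 7 = some a7 := by
    simp [PySem.List.pyGet?, PySem.List.pyIdx?]
    rw [if_pos (by omega)]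
    simp
  have e8 : PySem.List.pyGet? (a0 :: a1 :: a2 :: a3 :: a4 :: a5 :: a6 :: a7 :: a8 :: a9 :: rest) 8 = some a8 := by
    simp [PySem.List.pyGet?, PySem.List.pyIdx?]
    rw [if_pos (by omega)]
    simp
  have e9 : PySem.List.pyGet? (a0 :: a1 :: a2 :: a3 :: a4 :: a5 :: a6 :: a7 :: a8 :: a9 :: rest) 9 = some a9 := by
    simp [PySem.List.pyGet?, PySem.List.pyIdx?]
    rw [if_pos (by omega)]
    simp
  rw [pvCollect_eq, List.nil_append, pvAny_filter]
  simp [PySem.List.pyRange, pvScan, List.range_succ, List.any,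
    e0, e1, e2, e3, e4, e5, e6, e7, e8, e9]
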